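-- pv_equiv track=rewrite | github.com/BBamkorphai/OOD | recursive/Integfer_Partition.py | find_not_one_index
-- ===== SOURCE A (Python) =====
-- def find_not_one_index(holding_list, count=0):
--     if count <= len(holding_list) - 2:
--         if holding_list[count] != 1 and holding_list[count + 1] == 1:
--             return count
--         else:
--             count += 1
--             return find_not_one_index(holding_list, count)
--     else:
--         return count
-- ===== SOURCE B (Python) =====
-- def find_not_one_index(holding_list, count=0):
--     for i in range(count, len(holding_list) - 1):
--         if holding_list[i] != 1 and holding_list[i + 1] == 1:
--             return i
--     return max(count, len(holding_list) - 1)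
-- ===== Notes on version B (the rewrite author's own statement) =====
-- stated objective: idiomatic
-- what changed: Replaces the tail recursion that rebuilds the call for every index with a single explicit for-loop over range(count, len-1) returning on the first match, and a closed-form fallthrough max(count, len-1) for the no-match/terminal cases.
import Mathlib
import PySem

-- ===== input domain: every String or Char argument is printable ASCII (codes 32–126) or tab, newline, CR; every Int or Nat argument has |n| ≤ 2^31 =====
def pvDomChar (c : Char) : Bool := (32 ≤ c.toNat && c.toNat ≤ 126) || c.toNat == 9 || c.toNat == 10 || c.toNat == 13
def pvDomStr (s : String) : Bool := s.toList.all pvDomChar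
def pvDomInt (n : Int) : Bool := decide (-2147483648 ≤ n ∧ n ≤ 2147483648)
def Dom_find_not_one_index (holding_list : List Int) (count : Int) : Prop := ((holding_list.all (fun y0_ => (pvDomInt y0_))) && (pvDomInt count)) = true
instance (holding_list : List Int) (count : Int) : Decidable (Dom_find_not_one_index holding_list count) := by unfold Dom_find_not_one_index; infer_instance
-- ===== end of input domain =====

-- B replaces A's tail recursion by an explicit for-loop with a closed-form fallthrough (idiomatic; same cost).

-- ===== PORT A =====
-- literal transliteration of A's recursion; pyGetD's default 0 is only reached where Python's
-- holding_list[count] raises IndexError, which Pre_ excludes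
def find_not_one_index (holding_list : List Int) (count : Int) : Int :=
  if h : count ≤ (holding_list.length : Int) - 2 then
    if PySem.List.pyGetD holding_list count 0 ≠ 1 ∧ PySem.List.pyGetD holding_list (count + 1) 0 = 1 then
      count
    else
      find_not_one_index holding_list (count + 1)
  else
    count
termination_by ((holding_list.length : Int) - 1 - count).toNat
decreasing_by omega

-- ===== PORT B =====
-- the for-loop with early return is the first match over range(count, n-1)
def find_not_one_index_alt (holding_list : List Int) (count : Int) : Int :=
  match (PySem.List.pyRange count ((holding_list.length : Int) - 1) 1).find? (fun i =>
      decide (PySem.List.pyGetD holding_list i 0 ≠ 1 ∧ PySem.List.pyGetD holding_list (i + 1) 0 = 1)) with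
  | some i => i
  | none => max count ((holding_list.length : Int) - 1)

-- ===== PRECONDITION & SPEC =====
-- Excludes exactly the inputs where Python A raises IndexError: the very first probed index
-- holding_list[count] is out of range (count ≤ len-2 and count < -len). B raises there too.
def Pre_find_not_one_index (holding_list : List Int) (count : Int) : Prop :=
  ¬ (count ≤ (holding_list.length : Int) - 2 ∧ count < -(holding_list.length : Int))
instance (holding_list : List Int) (count : Int) : Decidable (Pre_find_not_one_index holding_list count) := by unfold Pre_find_not_one_index; infer_instance
def pvWitness_find_not_one_index : List Int × Int := ([2, 1, 3, 1], 0)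

def Spec_find_not_one_index (holding_list : List Int) (count : Int) (out : Int) : Prop := out = find_not_one_index_alt holding_list count
instance (holding_list : List Int) (count : Int) (out : Int) : Decidable (Spec_find_not_one_index holding_list count out) := by unfold Spec_find_not_one_index; infer_instance

-- ===== CLAIM (what is proved, stated in full; the proofs are below) =====
def Claim_equal_find_not_one_index : Prop := ∀ (holding_list : List Int) (count : Int), Dom_find_not_one_index holding_list count → Pre_find_not_one_index holding_list count → Spec_find_not_one_index holding_list count (find_not_one_index holding_list count)

-- ===== LEMMAS AND PROOFS =====

-- B at a count past the scan range returns count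
lemma alt_base (l : List Int) (count : Int) (hc : ¬ count ≤ (l.length : Int) - 2) :
    find_not_one_index_alt l count = count := by
  unfold find_not_one_index_alt
  rw [PySem.List.pyRange_one_eq_nil (by omega)]
  simp only [List.find?_nil]
  omega

-- B at a matching head index returns it
lemma alt_hit (l : List Int) (count : Int) (hc : count ≤ (l.length : Int) - 2)
    (hp : PySem.List.pyGetD l count 0 ≠ 1 ∧ PySem.List.pyGetD l (count + 1) 0 = 1) :
    find_not_one_index_alt l count = count := by
  unfold find_not_one_index_alt
  rw [PySem.List.pyRange_one_cons (by omega)]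
  simp [List.find?, hp]

-- stepping B past a non-matching head index
lemma alt_step (l : List Int) (count : Int) (hc : count ≤ (l.length : Int) - 2)
    (hp : ¬ (PySem.List.pyGetD l count 0 ≠ 1 ∧ PySem.List.pyGetD l (count + 1) 0 = 1)) :
    find_not_one_index_alt l count = find_not_one_index_alt l (count + 1) := by
  unfold find_not_one_index_alt
  rw [PySem.List.pyRange_one_cons (by omega)]
  simp only [List.find?]
  rw [decide_eq_false hp]
  cases h : (PySem.List.pyRange (count + 1) ((l.length : Int) - 1) 1).find? (fun i =>
      decide (PySem.List.pyGetD l i 0 ≠ 1 ∧ PySem.List.pyGetD l (i + 1) 0 = 1)) with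
  | some i => simp
  | none => simp; omega

lemma key (l : List Int) : ∀ (f : Nat) (count : Int),
    ((l.length : Int) - 1 - count).toNat ≤ f →
    find_not_one_index l count = find_not_one_index_alt l count := by
  intro f
  induction f with
  | zero =>
    intro count hf
    have hc : ¬ count ≤ (l.length : Int) - 2 := by omega
    rw [find_not_one_index, dif_neg hc, alt_base l count hc]
  | succ f ih =>
    intro count hf
    by_cases hc : count ≤ (l.length : Int) - 2
    · rw [find_not_one_index, dif_pos hc]
      by_cases hp : PySem.List.pyGetD l count 0 ≠ 1 ∧ PySem.List.pyGetD l (count + 1) 0 = 1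
      · rw [if_pos hp, alt_hit l count hc hp]
      · rw [if_neg hp, alt_step l count hc hp]
        exact ih (count + 1) (by omega)
    · rw [find_not_one_index, dif_neg hc, alt_base l count hc]

-- ===== VERDICT (by name: the statement is the Claim_ definition above) =====
theorem find_not_one_index_spec : Claim_equal_find_not_one_index := by
  intro l count _ _
  exact key l (((l.length : Int) - 1 - count).toNat) count le_rfl
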